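-- pv_equiv track=rewrite | github.com/hesreallyhim/antipasta | src/antipasta/cli/stats_display.py | build_grouped_statistics_headers
-- ===== SOURCE A (Python) =====
-- from typing import Any
--
-- def build_grouped_statistics_headers(stats_data: dict[str, Any]) -> list[str]:
--     """Build header row for grouped statistics table.
--
--     Args:
--         stats_data: Grouped statistics data
--
--     Returns:
--         List of header column names
--     """
--     all_keys = set()
--     for data in stats_data.values():
--         all_keys.update(data.keys())
--
--     headers = ["Location", "Files", "Functions"]
--
--     add_loc_headers_if_present(headers, stats_data)
--     add_metric_headers(headers, all_keys)
--
--     return headers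
--
-- def add_loc_headers_if_present(headers: list[str], stats_data: dict[str, Any]) -> None:
--     """Add LOC-related headers if present in the data."""
--     if any("avg_file_loc" in data for data in stats_data.values()):
--         headers.append("Avg File LOC")
--     if any("total_loc" in data for data in stats_data.values()):
--         headers.append("Total LOC")
--
-- def add_metric_headers(headers: list[str], all_keys: set[str]) -> None:
--     """Add metric headers for average values."""
--     for key in sorted(all_keys):
--         if is_displayable_average_metric(key):
--             formatted_header = key.replace("avg_", "Avg ").replace("_", " ").title()
--             headers.append(formatted_header)
--
-- def is_displayable_average_metric(key: str) -> bool: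
--     """Check if a metric key should be displayed as a column header."""
--     return key.startswith("avg_") and key not in ["avg_file_loc", "avg_function_loc"]
-- ===== SOURCE B (Python) =====
-- def build_grouped_statistics_headers(stats_data):
--     """Build header row for grouped statistics table.
--
--     Single streaming pass over every key: no set is built and sorted() is never
--     called; each displayable metric key is placed directly into its sorted slot
--     (insertion with duplicate skip), while two flags record the LOC columns.
--     Correct because a duplicate-free insertion-sorted list of the displayable
--     keys equals the sorted set A computes, and the flags equal A's any() scans.
--     """
--     have_file_loc = False
--     have_total_loc = False
--     metrics = []  # strictly increasing, duplicate-free displayable avg_ keys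
--     for data in stats_data.values():
--         for key in data:
--             if key == "avg_file_loc":
--                 have_file_loc = True
--             elif key == "total_loc":
--                 have_total_loc = True
--             elif key.startswith("avg_") and key != "avg_function_loc":
--                 i = 0
--                 while i < len(metrics) and metrics[i] < key:
--                     i += 1
--                 if i == len(metrics) or metrics[i] != key:
--                     metrics.insert(i, key)
--     headers = ["Location", "Files", "Functions"]
--     if have_file_loc:
--         headers.append("Avg File LOC")
--     if have_total_loc:
--         headers.append("Total LOC")
--     for key in metrics:
--         headers.append(key.replace("avg_", "Avg ").replace("_", " ").title())
--     return headers
-- ===== Notes on version B (the rewrite author's own statement) =====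
-- stated objective: alternative
-- what changed: B makes one streaming pass over every key with no set and no sorted() call: each displayable metric key is inserted directly into its sorted slot of a duplicate-free list and two booleans record the LOC columns, replacing A's set-union pass, two any() rescans and final sort of the set.
import Mathlib
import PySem

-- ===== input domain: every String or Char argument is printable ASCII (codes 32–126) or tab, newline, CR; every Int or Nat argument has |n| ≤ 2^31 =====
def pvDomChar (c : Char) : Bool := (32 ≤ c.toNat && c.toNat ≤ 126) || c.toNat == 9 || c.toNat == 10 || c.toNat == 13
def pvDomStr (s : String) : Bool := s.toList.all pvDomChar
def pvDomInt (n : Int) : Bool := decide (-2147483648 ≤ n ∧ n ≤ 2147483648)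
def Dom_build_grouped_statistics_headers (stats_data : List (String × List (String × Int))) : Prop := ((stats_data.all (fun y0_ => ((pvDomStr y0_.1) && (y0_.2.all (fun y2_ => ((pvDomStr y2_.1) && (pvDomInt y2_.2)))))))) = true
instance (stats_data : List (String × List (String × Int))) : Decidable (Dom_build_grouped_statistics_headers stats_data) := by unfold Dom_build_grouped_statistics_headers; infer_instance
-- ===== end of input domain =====

-- B makes one streaming pass over the keys (no set, no sorted() call): displayable
-- metric keys are inserted directly into their sorted slot of a duplicate-free list
-- and two booleans record the LOC columns (objective: alternative algorithm).

-- hand port of str.title(): exact on the ASCII domain (cased chars = ASCII letters);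
-- shared by both ports because PySem has no title primitive
def pyTitleAux : Bool → List Char → List Char
  | _, [] => []
  | prevCased, c :: rest =>
    if c.isAlpha then
      (if prevCased then c.toLower else c.toUpper) :: pyTitleAux true rest
    else
      c :: pyTitleAux false rest

def pyTitle (s : String) : String := String.ofList (pyTitleAux false s.toList)

-- key.replace("avg_", "Avg ").replace("_", " ").title()  (shared formatting step)
def pvFormatHeader (key : String) : String :=
  pyTitle (PySem.Str.replace (PySem.Str.replace key "avg_" "Avg ") "_" " ")

-- ===== PORT A =====
-- is_displayable_average_metric
def is_displayable_average_metric (key : String) : Bool :=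
  PySem.Str.startswith key "avg_" && !(key == "avg_file_loc" || key == "avg_function_loc")

-- add_loc_headers_if_present (returns the mutated headers list)
def add_loc_headers_if_present (headers : List String) (stats_data : List (String × List (String × Int))) : List String :=
  let headers :=
    if (stats_data.map Prod.snd).any (fun data => (data.map Prod.fst).contains "avg_file_loc") then
      headers ++ ["Avg File LOC"] else headers
  if (stats_data.map Prod.snd).any (fun data => (data.map Prod.fst).contains "total_loc") then
    headers ++ ["Total LOC"] else headers

-- add_metric_headers
def add_metric_headers (headers : List String) (all_keys : PySem.Set String) : List String :=
  (PySem.List.sorted all_keys (fun x => x) false).foldl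
    (fun acc key => if is_displayable_average_metric key then acc ++ [pvFormatHeader key] else acc)
    headers

def build_grouped_statistics_headers (stats_data : List (String × List (String × Int))) : List String :=
  let all_keys : PySem.Set String :=
    stats_data.foldl (fun s data => PySem.Set.update s (data.2.map Prod.fst)) PySem.Set.empty
  let headers := ["Location", "Files", "Functions"]
  let headers := add_loc_headers_if_present headers stats_data
  let headers := add_metric_headers headers all_keys
  headers

-- ===== PORT B =====
-- Source B's inner while/insert: walk to the first slot not < key, insert unless equal
def pvInsMetric (key : String) : List String → List String
  | [] => [key]
  | m :: rest =>
    if m < key then m :: pvInsMetric key rest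
    else if m == key then m :: rest
    else key :: m :: rest

-- Source B's if/elif chain for one key, on the state (have_file_loc, have_total_loc, metrics)
def pvStepKey (st : Bool × Bool × List String) (key : String) : Bool × Bool × List String :=
  if key == "avg_file_loc" then (true, st.2.1, st.2.2)
  else if key == "total_loc" then (st.1, true, st.2.2)
  else if PySem.Str.startswith key "avg_" && !(key == "avg_function_loc") then
    (st.1, st.2.1, pvInsMetric key st.2.2)
  else st

def build_grouped_statistics_headers_alt (stats_data : List (String × List (String × Int))) : List String :=
  let st :=
    stats_data.foldl (fun st data => data.2.foldl (fun st kv => pvStepKey st kv.1) st)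
      (false, false, [])
  let headers := ["Location", "Files", "Functions"]
  let headers := if st.1 then headers ++ ["Avg File LOC"] else headers
  let headers := if st.2.1 then headers ++ ["Total LOC"] else headers
  st.2.2.foldl (fun acc key => acc ++ [pvFormatHeader key]) headers

-- ===== PRECONDITION & SPEC =====
def Spec_build_grouped_statistics_headers (stats_data : List (String × List (String × Int))) (out : List String) : Prop := out = build_grouped_statistics_headers_alt stats_data
instance (stats_data : List (String × List (String × Int))) (out : List String) : Decidable (Spec_build_grouped_statistics_headers stats_data out) := by unfold Spec_build_grouped_statistics_headers; infer_instance

-- ===== CLAIM (what is proved, stated in full; the proofs are below) =====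
def Claim_equal_build_grouped_statistics_headers : Prop := ∀ (stats_data : List (String × List (String × Int))), Dom_build_grouped_statistics_headers stats_data → Spec_build_grouped_statistics_headers stats_data (build_grouped_statistics_headers stats_data)

-- ===== LEMMAS AND PROOFS =====

-- membership in B's insertion result
lemma mem_pvInsMetric (k x : String) (ms : List String) :
    x ∈ pvInsMetric k ms ↔ x = k ∨ x ∈ ms := by
  induction ms with
  | nil => simp [pvInsMetric]
  | cons m rest ih =>
    simp only [pvInsMetric]
    split_ifs with h1 h2
    · rw [List.mem_cons, ih, List.mem_cons]; tauto
    · have hmk : m = k := by simpa using h2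
      subst hmk; simp only [List.mem_cons]; tauto
    · simp only [List.mem_cons]

-- B's insertion keeps the metrics list strictly increasing
lemma pairwise_pvInsMetric (k : String) (ms : List String) (h : ms.Pairwise (· < ·)) :
    (pvInsMetric k ms).Pairwise (· < ·) := by
  induction ms with
  | nil => simp [pvInsMetric]
  | cons m rest ih =>
    rw [List.pairwise_cons] at h
    simp only [pvInsMetric]
    split_ifs with h1 h2
    · rw [List.pairwise_cons]
      refine ⟨?_, ih h.2⟩
      intro x hx
      rcases (mem_pvInsMetric k x rest).1 hx with rfl | hx
      · exact h1
      · exact h.1 x hx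
    · exact List.pairwise_cons.2 h
    · have hmk : m ≠ k := by simpa using h2
      have hk : k < m := lt_of_le_of_ne (not_lt.mp h1) (Ne.symm hmk)
      rw [List.pairwise_cons]
      refine ⟨?_, List.pairwise_cons.2 h⟩
      intro x hx
      rcases List.mem_cons.1 hx with rfl | hx
      · exact hk
      · exact lt_trans hk (h.1 x hx)

-- the fold of B's step over a flat key list, described componentwise
lemma foldl_pvStepKey (ks : List String) (st : Bool × Bool × List String) :
    ks.foldl pvStepKey st =
      (st.1 || ks.any (fun k => k == "avg_file_loc"),
       st.2.1 || ks.any (fun k => k == "total_loc"),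
       (ks.filter is_displayable_average_metric).foldl (fun ms k => pvInsMetric k ms) st.2.2) := by
  induction ks generalizing st with
  | nil => simp
  | cons k rest ih =>
    by_cases h1 : k = "avg_file_loc"
    · subst h1
      simp [pvStepKey, ih, (by decide : is_displayable_average_metric "avg_file_loc" = false)]
    · by_cases h2 : k = "total_loc"
      · subst h2
        simp [pvStepKey, ih, (by decide : is_displayable_average_metric "total_loc" = false)]
      · have hne : (k == "avg_file_loc") = false := by simp [h1]
        have hne2 : (k == "total_loc") = false := by simp [h2]
        have hstep : pvStepKey st k =
            if is_displayable_average_metric k = true then (st.1, st.2.1, pvInsMetric k st.2.2)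
            else st := by
          simp [pvStepKey, is_displayable_average_metric, hne, hne2]
        by_cases hm : is_displayable_average_metric k = true
        · simp [List.foldl_cons, hstep, hm, ih, hne, hne2]
        · simp [List.foldl_cons, hstep, hm, ih, hne, hne2]

-- the nested fold over the groups is the flat fold over the concatenated keys
lemma nested_foldl_eq_flat (sd : List (String × List (String × Int))) (st : Bool × Bool × List String) :
    sd.foldl (fun st data => data.2.foldl (fun st kv => pvStepKey st kv.1) st) st
      = (sd.flatMap (fun data => data.2.map Prod.fst)).foldl pvStepKey st := by
  induction sd generalizing st with
  | nil => rfl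
  | cons d rest ih => simp [List.foldl_append, List.foldl_map, ih]

-- the flags are A's any()-scans
lemma any_map_eq (sd : List (String × List (String × Int))) (k : String) :
    (sd.map Prod.snd).any (fun data => (data.map Prod.fst).contains k)
      = (sd.flatMap (fun data => data.2.map Prod.fst)).any (fun x => x == k) := by
  rw [Bool.eq_iff_iff]
  simp [List.any_eq_true]

-- the fold of insertions over any key list is strictly increasing with the keys as members
lemma foldl_ins_sorted_mem (ks : List String) (ms : List String) (h : ms.Pairwise (· < ·)) :
    (ks.foldl (fun ms k => pvInsMetric k ms) ms).Pairwise (· < ·)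
      ∧ ∀ x, x ∈ ks.foldl (fun ms k => pvInsMetric k ms) ms ↔ x ∈ ks ∨ x ∈ ms := by
  induction ks generalizing ms with
  | nil => exact ⟨h, fun x => by simp⟩
  | cons k rest ih =>
    obtain ⟨hp, hm⟩ := ih (pvInsMetric k ms) (pairwise_pvInsMetric k ms h)
    refine ⟨hp, fun x => ?_⟩
    rw [List.foldl_cons, hm x, mem_pvInsMetric]
    simp; tauto

-- A's sorted-set-filter equals B's insertion-built metrics list
lemma metrics_eq (ks : List String) :
    (PySem.List.sorted (PySem.Set.ofList ks) (fun x => x) false).filter is_displayable_average_metric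
      = (ks.filter is_displayable_average_metric).foldl (fun ms k => pvInsMetric k ms) [] := by
  obtain ⟨hp, hm⟩ := foldl_ins_sorted_mem (ks.filter is_displayable_average_metric) [] (by simp)
  have hap : ((PySem.List.sorted (PySem.Set.ofList ks) (fun x => x) false).filter
      is_displayable_average_metric).Pairwise (· < ·) :=
    (PySem.List.sorted_ofList_pairwise_lt (xs := ks)).filter _
  have hmem : ∀ x, x ∈ (PySem.List.sorted (PySem.Set.ofList ks) (fun x => x) false).filter
      is_displayable_average_metric ↔
      x ∈ (ks.filter is_displayable_average_metric).foldl (fun ms k => pvInsMetric k ms) [] := by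
    intro x
    rw [hm x]
    simp [List.mem_filter, PySem.List.mem_sorted, PySem.Set.mem_ofList]
  have hperm : ((PySem.List.sorted (PySem.Set.ofList ks) (fun x => x) false).filter
        is_displayable_average_metric).Perm
      ((ks.filter is_displayable_average_metric).foldl (fun ms k => pvInsMetric k ms) []) := by
    rw [List.perm_ext_iff_of_nodup hap.nodup hp.nodup]
    exact hmem
  exact hperm.eq_of_pairwise (fun a b _ _ hab hba => absurd hba (asymm hab)) hap hp

-- A's per-group Set.update loop builds the set of the flattened keys
lemma set_eq (sd : List (String × List (String × Int))) :
    sd.foldl (fun s data => PySem.Set.update s (data.2.map Prod.fst)) PySem.Set.empty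
      = PySem.Set.ofList (sd.flatMap (fun data => data.2.map Prod.fst)) := by
  have : ∀ (l : List (String × List (String × Int))) (s : PySem.Set String),
      l.foldl (fun s data => PySem.Set.update s (data.2.map Prod.fst)) s
        = PySem.Set.update s (l.flatMap (fun data => data.2.map Prod.fst)) := by
    intro l
    induction l with
    | nil => intro s; simp [PySem.Set.update]
    | cons h t ih => intro s; simp [PySem.Set.update, List.foldl_append] at *; simp [ih]
  rw [this]
  simp [PySem.Set.update, PySem.Set.ofList_eq_foldl, PySem.Set.empty]

-- ===== VERDICT (by name: the statement is the Claim_ definition above) =====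
theorem build_grouped_statistics_headers_spec : Claim_equal_build_grouped_statistics_headers := by
  intro sd _
  unfold Spec_build_grouped_statistics_headers build_grouped_statistics_headers build_grouped_statistics_headers_alt
  unfold add_loc_headers_if_present add_metric_headers
  dsimp only
  rw [set_eq, PySem.List.foldl_append_if, nested_foldl_eq_flat, foldl_pvStepKey]
  rw [any_map_eq sd "avg_file_loc", any_map_eq sd "total_loc"]
  rw [PySem.List.foldl_append_singleton_eq_map]
  dsimp only
  rw [metrics_eq]
  simp only [Bool.false_or]
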